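-- pv_equiv track=rewrite | github.com/xcisq/free-ai-draw | autodraw/backend/app/services/scene_service.py | _resolve_font_family
-- ===== SOURCE A (Python) =====
-- DEFAULT_TEXT_FONT_FAMILY = '"Segoe UI", "Helvetica Neue", Arial, sans-serif'
--
-- def _resolve_font_family(value: str | None) -> str:
--     normalized = (value or "").strip()
--     if not normalized:
--         return DEFAULT_TEXT_FONT_FAMILY
--     families = _split_font_family_candidates(normalized)
--     if not families:
--         return DEFAULT_TEXT_FONT_FAMILY
--     if not any(item.lower() in {"serif", "sans-serif", "monospace", "cursive", "fantasy", "system-ui"} for item in families):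
--         families.append("sans-serif")
--     return ", ".join(families)
--
-- def _split_font_family_candidates(value: str | None) -> list[str]:
--     if not value:
--         return []
--     parts = []
--     for item in value.split(","):
--         normalized = item.strip()
--         if normalized:
--             parts.append(normalized)
--     deduped: list[str] = []
--     seen: set[str] = set()
--     for item in parts:
--         lowered = item.lower()
--         if lowered in seen:
--             continue
--         seen.add(lowered)
--         deduped.append(item)
--     return deduped
-- ===== SOURCE B (Python) =====
-- DEFAULT_TEXT_FONT_FAMILY = '"Segoe UI", "Helvetica Neue", Arial, sans-serif'
--
-- _GENERIC_FAMILIES = {"serif", "sans-serif", "monospace", "cursive", "fantasy", "system-ui"}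
--
--
-- def _unique_families(tokens):
--     # Dedup by recursive removal: keep the head, then recurse on the rest with
--     # every case-insensitive duplicate of the head filtered away (no seen set).
--     if not tokens:
--         return []
--     head = tokens[0]
--     key = head.lower()
--     return [head] + _unique_families([t for t in tokens[1:] if t.lower() != key])
--
--
-- def _resolve_font_family(value):
--     normalized = (value or "").strip()
--     if not normalized:
--         return DEFAULT_TEXT_FONT_FAMILY
--     tokens = [t.strip() for t in normalized.split(",") if t.strip()]
--     if not tokens:
--         return DEFAULT_TEXT_FONT_FAMILY
--     families = _unique_families(tokens)
--     if _GENERIC_FAMILIES.isdisjoint(t.lower() for t in families):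
--         families.append("sans-serif")
--     return ", ".join(families)
-- ===== Notes on version B (the rewrite author's own statement) =====
-- stated objective: alternative
-- what changed: Dedup by seen-set loop is replaced with a recursive removal dedup (keep the head, recurse on the rest with the head's case-insensitive duplicates filtered out), tokens come from a comprehension instead of an accumulator loop, and the any() scan for a generic family becomes a set-disjointness test.
import Mathlib
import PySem

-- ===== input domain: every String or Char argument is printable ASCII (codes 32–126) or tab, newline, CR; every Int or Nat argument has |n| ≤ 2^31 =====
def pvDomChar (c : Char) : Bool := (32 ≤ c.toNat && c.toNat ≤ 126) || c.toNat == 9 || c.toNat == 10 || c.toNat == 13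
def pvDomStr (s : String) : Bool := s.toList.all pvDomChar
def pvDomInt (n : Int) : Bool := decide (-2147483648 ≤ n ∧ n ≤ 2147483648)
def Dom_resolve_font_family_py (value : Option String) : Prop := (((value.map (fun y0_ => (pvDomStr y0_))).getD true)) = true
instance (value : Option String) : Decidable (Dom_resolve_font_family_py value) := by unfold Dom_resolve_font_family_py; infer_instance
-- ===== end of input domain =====

-- B replaces A's seen-set dedup loop by a recursive removal dedup (keep the head, filter its
-- case-insensitive duplicates from the rest) and the any() scan by a set-disjointness test;
-- same return value everywhere (objective: alternative decomposition).

def pvDefaultFont : String := "\"Segoe UI\", \"Helvetica Neue\", Arial, sans-serif"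
def pvGenerics : List String := ["serif", "sans-serif", "monospace", "cursive", "fantasy", "system-ui"]

-- ===== PORT A =====
-- loop body of A's first loop: strip, keep non-empty
def pvFiltStep (acc : List String) (item : String) : List String :=
  let normalized := PySem.Str.strip item
  if normalized ≠ "" then acc ++ [normalized] else acc

-- loop body of A's dedup loop (state: deduped, seen)
def pvDedupStep (st : List String × PySem.Set String) (item : String) : List String × PySem.Set String :=
  let lowered := PySem.Str.lower item
  if PySem.Set.contains st.2 lowered then st
  else (st.1 ++ [item], PySem.Set.add st.2 lowered)

-- port of _split_font_family_candidates; sep "," is a nonempty literal, so split? is some (getD never fires)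
def split_font_family_candidates_py (value : String) : List String :=
  if value = "" then []
  else
    let parts := ((PySem.Str.split? value ",").getD []).foldl pvFiltStep []
    (parts.foldl pvDedupStep ([], PySem.Set.empty)).1

def resolve_font_family_py (value : Option String) : String :=
  let normalized := PySem.Str.strip (value.getD "")
  if normalized = "" then pvDefaultFont
  else
    let families := split_font_family_candidates_py normalized
    if families = [] then pvDefaultFont
    else
      let families' :=
        if !(families.any (fun item => pvGenerics.contains (PySem.Str.lower item))) then
          families ++ ["sans-serif"]
        else families
      PySem.Str.join ", " families'

-- ===== PORT B =====
-- B's _unique_families: keep the head, recurse on the rest with the head's duplicates filtered out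
def pvUniq (tokens : List String) : List String :=
  match tokens with
  | [] => []
  | head :: rest =>
    let key := PySem.Str.lower head
    [head] ++ pvUniq (rest.filter (fun t => PySem.Str.lower t ≠ key))
termination_by tokens.length
decreasing_by
  simp only [List.length_unattach]
  exact Nat.lt_succ_of_le (le_trans (List.length_filter_le _ _) (by simp))

def resolve_font_family_py_alt (value : Option String) : String :=
  let normalized := PySem.Str.strip (value.getD "")
  if normalized = "" then pvDefaultFont
  else
    let tokens := (((PySem.Str.split? normalized ",").getD []).map PySem.Str.strip).filter
      (fun t => t ≠ "")
    if tokens = [] then pvDefaultFont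
    else
      let families := pvUniq tokens
      let families' :=
        if PySem.Set.isdisjoint pvGenerics (families.map PySem.Str.lower) then
          families ++ ["sans-serif"]
        else families
      PySem.Str.join ", " families'

-- ===== PRECONDITION & SPEC =====
def Spec_resolve_font_family_py (value : Option String) (out : String) : Prop := out = resolve_font_family_py_alt value
instance (value : Option String) (out : String) : Decidable (Spec_resolve_font_family_py value out) := by unfold Spec_resolve_font_family_py; infer_instance

-- ===== CLAIM (what is proved, stated in full; the proofs are below) =====
def Claim_equal_resolve_font_family_py : Prop := ∀ (value : Option String), Dom_resolve_font_family_py value → Spec_resolve_font_family_py value (resolve_font_family_py value)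

-- ===== LEMMAS AND PROOFS =====

-- A's first loop builds exactly B's comprehension: strip each token, keep the non-empty ones
theorem pv_filt_acc (toks : List String) (acc : List String) :
    toks.foldl pvFiltStep acc = acc ++ toks.foldl pvFiltStep [] := by
  induction toks generalizing acc with
  | nil => simp
  | cons tok toks ih =>
    simp only [List.foldl_cons]
    rw [ih (pvFiltStep acc tok), ih (pvFiltStep [] tok)]
    unfold pvFiltStep
    by_cases h : PySem.Str.strip tok = "" <;> simp [h]

theorem pv_filt_eq (toks : List String) :
    toks.foldl pvFiltStep [] = (toks.map PySem.Str.strip).filter (fun t => t ≠ "") := by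
  induction toks with
  | nil => rfl
  | cons tok toks ih =>
    rw [List.foldl_cons, pv_filt_acc toks (pvFiltStep [] tok), ih, List.map_cons, List.filter_cons]
    unfold pvFiltStep
    by_cases h : PySem.Str.strip tok = "" <;> simp [h]

-- A's dedup loop computes B's recursive removal dedup of the not-yet-seen tokens
theorem pvUniq_cons (h : String) (t : List String) :
    pvUniq (h :: t) = h :: pvUniq (t.filter (fun x => PySem.Str.lower x ≠ PySem.Str.lower h)) := by
  rw [pvUniq]
  rfl

theorem pv_dedup_eq (toks : List String) (out : List String) (seen : PySem.Set String) :
    (toks.foldl pvDedupStep (out, seen)).1 =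
      out ++ pvUniq (toks.filter (fun t => !(PySem.Set.contains seen (PySem.Str.lower t)))) := by
  induction toks generalizing out seen with
  | nil => simp [pvUniq]
  | cons tok toks ih =>
    simp only [List.foldl_cons, List.filter_cons]
    by_cases h : PySem.Set.contains seen (PySem.Str.lower tok) = true
    · have hm : PySem.Str.lower tok ∈ seen := (PySem.Set.contains_iff seen _).mp h
      rw [show pvDedupStep (out, seen) tok = (out, seen) from by simp [pvDedupStep, hm]]
      rw [if_neg (by simpa using hm)]
      exact ih out seen
    · have hm : PySem.Str.lower tok ∉ seen := fun hmem => h ((PySem.Set.contains_iff seen _).mpr hmem)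
      rw [show pvDedupStep (out, seen) tok
          = (out ++ [tok], PySem.Set.add seen (PySem.Str.lower tok)) from by
        simp [pvDedupStep, hm]]
      rw [ih (out ++ [tok]) (PySem.Set.add seen (PySem.Str.lower tok)), if_pos (by simpa using hm),
        pvUniq_cons, List.filter_filter, List.append_assoc, List.singleton_append]
      congr 2
      congr 1
      apply List.filter_congr
      intro t _
      by_cases ht : PySem.Str.lower t = PySem.Str.lower tok <;> simp [ht]

theorem pv_uniq_nil_iff (ts : List String) : pvUniq ts = [] ↔ ts = [] := by
  cases ts with
  | nil => simp [pvUniq]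
  | cons h t => rw [pvUniq]; simp

-- B's disjointness test = negation of A's any() scan
theorem pv_disjoint_eq (fams : List String) :
    PySem.Set.isdisjoint pvGenerics (fams.map PySem.Str.lower)
      = !(fams.any (fun item => pvGenerics.contains (PySem.Str.lower item))) := by
  rw [Bool.eq_iff_iff, PySem.Set.isdisjoint_iff]
  simp only [Bool.not_eq_true', List.any_eq_false]
  constructor
  · intro h f hf
    by_cases hc : pvGenerics.contains (PySem.Str.lower f) = true
    · exact absurd (List.mem_map.mpr ⟨f, hf, rfl⟩) (h _ (List.contains_iff_mem.mp hc))
    · simpa using hc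
  · intro h g hg hmem
    obtain ⟨f, hf, rfl⟩ := List.mem_map.mp hmem
    exact absurd hg (by simpa using h f hf)

-- proof-only helper: the empty seen-set filters out nothing
theorem pv_filter_empty (l : List String) :
    l.filter (fun t => !(PySem.Set.contains PySem.Set.empty (PySem.Str.lower t))) = l := by
  apply List.filter_eq_self.mpr
  intro t _
  simp [PySem.Set.empty]

-- ===== VERDICT (by name: the statement is the Claim_ definition above) =====
theorem resolve_font_family_py_spec : Claim_equal_resolve_font_family_py := by
  intro value _
  show resolve_font_family_py value = resolve_font_family_py_alt value
  unfold resolve_font_family_py resolve_font_family_py_alt split_font_family_candidates_py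
  by_cases h : PySem.Str.strip (value.getD "") = ""
  · simp only [h, if_pos]
  · simp only [if_neg h]
    rw [pv_dedup_eq, pv_filter_empty, pv_filt_eq, List.nil_append]
    simp only [pv_uniq_nil_iff, pv_disjoint_eq]
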